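-- pv_equiv track=rewrite | github.com/fullerzz/advent-of-code-2023 | advent/day_one/day_one.py | getReplacementOrder
-- ===== SOURCE A (Python) =====
-- numbers: list[str] = ["one", "two", "three", "four", "five", "six", "seven", "eight", "nine"]
--
-- def getReplacementOrder(line: str) -> list[tuple]:
--     # We may need to limit the replacements to one at a time then reevaluate
--     numsFound: list[str] = []
--     # Determine which numbers appear in line
--     for num in numbers:
--         if num in line:
--             numsFound.append(num)
--
--     # Determine the starting position of each num that appears
--     orderInfo : list[tuple] = []
--     for num in numsFound:
--         index: int = line.find(num)
--         orderInfo.append((index, num))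
--
--     orderInfo.sort()
--     return orderInfo
-- ===== SOURCE B (Python) =====
-- numbers: list[str] = ["one", "two", "three", "four", "five", "six", "seven", "eight", "nine"]
--
-- def getReplacementOrder(line: str) -> list[tuple]:
--     # Single left-to-right scan: at each position test which number word starts
--     # there; record only the first hit per word.  Distinct number words can never
--     # start at the same position (none is a prefix of another), so the result is
--     # already in (index, word) order.
--     seen: set[str] = set()
--     orderInfo: list[tuple] = []
--     for i in range(len(line)):
--         for num in numbers:
--             if num not in seen and line.startswith(num, i):
--                 seen.add(num)
--                 orderInfo.append((i, num))
--     return orderInfo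
-- ===== Notes on version B (the rewrite author's own statement) =====
-- stated objective: alternative
-- what changed: Replaces A's nine independent substring scans (membership test plus find per word) followed by a sort with one left-to-right positional scan that tests startswith for each not-yet-seen word at every index, emitting pairs already in index order with no sort.
import Mathlib
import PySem

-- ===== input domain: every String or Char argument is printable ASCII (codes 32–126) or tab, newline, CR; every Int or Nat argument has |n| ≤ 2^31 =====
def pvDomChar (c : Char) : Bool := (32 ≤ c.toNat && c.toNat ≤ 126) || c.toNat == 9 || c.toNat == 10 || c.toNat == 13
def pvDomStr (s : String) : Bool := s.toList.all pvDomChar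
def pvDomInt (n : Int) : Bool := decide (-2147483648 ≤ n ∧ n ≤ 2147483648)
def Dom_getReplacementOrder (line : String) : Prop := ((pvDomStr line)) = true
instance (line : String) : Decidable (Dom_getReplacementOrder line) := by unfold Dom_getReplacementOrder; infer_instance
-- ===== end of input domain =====

-- B replaces A's nine independent substring scans plus a sort by one left-to-right
-- positional scan emitting first occurrences already in index order (alternative decomposition).

-- ===== PORT A =====
def pyNumbers : List String := ["one", "two", "three", "four", "five", "six", "seven", "eight", "nine"]

def getReplacementOrder (line : String) : List (Int × String) :=
  let numsFound : List String :=
    pyNumbers.foldl (fun acc num => if PySem.Str.isIn num line then acc ++ [num] else acc) []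
  let orderInfo : List (Int × String) :=
    numsFound.foldl (fun acc num => acc ++ [(PySem.Str.find line num, num)]) []
  PySem.List.sorted2 orderInfo (fun p => p.1) (fun p => p.2)

-- ===== PORT B =====
-- line.startswith(num, i) with 0 ≤ i is exact as startswith on the i-dropped character list
def altStep (s : List Char) (st : PySem.Set String × List (Int × String)) (i : Nat) :
    PySem.Set String × List (Int × String) :=
  pyNumbers.foldl (fun st num =>
    if num ∉ st.1 ∧ PySem.Chars.startswith (s.drop i) num.toList = true then
      (st.1.add num, st.2 ++ [((i : Int), num)])
    else st) st

def getReplacementOrder_alt (line : String) : List (Int × String) :=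
  let s := line.toList
  ((List.range s.length).foldl (altStep s) (PySem.Set.empty, [])).2

-- ===== PRECONDITION & SPEC =====
def Spec_getReplacementOrder (line : String) (out : List (Int × String)) : Prop := out = getReplacementOrder_alt line
instance (line : String) (out : List (Int × String)) : Decidable (Spec_getReplacementOrder line out) := by unfold Spec_getReplacementOrder; infer_instance

-- ===== CLAIM (what is proved, stated in full; the proofs are below) =====
def Claim_equal_getReplacementOrder : Prop := ∀ (line : String), Dom_getReplacementOrder line → Spec_getReplacementOrder line (getReplacementOrder line)

-- ===== LEMMAS AND PROOFS =====

-- "the word w occurs in s at position j"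
abbrev Occ (s : List Char) (j : Nat) (w : String) : Prop := w.toList <+: s.drop j

-- the pairs B emits while scanning position j: words whose FIRST occurrence is j
def canonGroup (s : List Char) (j : Nat) : List (Int × String) :=
  (pyNumbers.filter (fun w => decide (Occ s j w ∧ ∀ k, k < j → ¬ Occ s k w))).map
    (fun w => ((j : Int), w))

def canon (s : List Char) (n : Nat) : List (Int × String) :=
  (List.range n).flatMap (canonGroup s)

theorem pyNodup : pyNumbers.Nodup := by decide

theorem pyNonempty : ∀ w ∈ pyNumbers, w.toList ≠ [] := by decide

theorem noPrefix : ∀ w1 ∈ pyNumbers, ∀ w2 ∈ pyNumbers, w1.toList <+: w2.toList → w1 = w2 := by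
  decide

theorem occ_unique {s : List Char} {j : Nat} {w1 w2 : String}
    (h1 : w1 ∈ pyNumbers) (h2 : w2 ∈ pyNumbers) (o1 : Occ s j w1) (o2 : Occ s j w2) :
    w1 = w2 := by
  rcases List.prefix_or_prefix_of_prefix o1 o2 with h | h
  · exact noPrefix w1 h1 w2 h2 h
  · exact (noPrefix w2 h2 w1 h1 h).symm

theorem inner_spec (s : List Char) (i : Nat) :
    ∀ (ws : List String), ws.Nodup → ∀ (seen : PySem.Set String) (out : List (Int × String)),
    ∃ seen' : PySem.Set String,
      ws.foldl (fun st num =>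
        if num ∉ st.1 ∧ PySem.Chars.startswith (s.drop i) num.toList = true then
          (st.1.add num, st.2 ++ [((i : Int), num)])
        else st) (seen, out)
      = (seen', out ++ (ws.filter (fun w =>
            decide (w ∉ seen ∧ PySem.Chars.startswith (s.drop i) w.toList = true))).map
            (fun w => ((i : Int), w)))
      ∧ ∀ w : String, w ∈ seen' ↔
          w ∈ seen ∨ (w ∈ ws ∧ w ∉ seen ∧ PySem.Chars.startswith (s.drop i) w.toList = true) := by
  intro ws
  induction ws with
  | nil =>
    intro _ seen out
    exact ⟨seen, by simp, fun w => by simp⟩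
  | cons num ws ih =>
    intro hnd seen out
    obtain ⟨hnum, hnd'⟩ := List.nodup_cons.mp hnd
    simp only [List.foldl_cons]
    by_cases hcnd : num ∉ seen ∧ PySem.Chars.startswith (s.drop i) num.toList = true
    · rw [if_pos hcnd]
      obtain ⟨seen', heq, hmem⟩ := ih hnd' (seen.add num) (out ++ [((i : Int), num)])
      refine ⟨seen', ?_, ?_⟩
      · rw [heq]
        have hfe : ws.filter (fun w =>
              decide (w ∉ seen.add num ∧ PySem.Chars.startswith (s.drop i) w.toList = true))
            = ws.filter (fun w =>
              decide (w ∉ seen ∧ PySem.Chars.startswith (s.drop i) w.toList = true)) := by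
          refine List.filter_congr ?_
          intro w hw
          have hne : w ≠ num := fun he => hnum (he ▸ hw)
          simp only [decide_eq_decide]
          rw [PySem.Set.mem_add]
          constructor
          · rintro ⟨h1, h2⟩; exact ⟨fun hm => h1 (Or.inl hm), h2⟩
          · rintro ⟨h1, h2⟩; exact ⟨fun hm => (hm.elim h1 hne), h2⟩
        rw [hfe, List.filter_cons_of_pos (by simpa using hcnd)]
        simp
      · intro w
        rw [hmem w, PySem.Set.mem_add]
        by_cases hwn : w = num
        · subst hwn
          simp [hcnd]
        · constructor
          · rintro (⟨h | h⟩ | ⟨h1, h2, h3⟩)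
            · exact Or.inl h
            · exact absurd h hwn
            · exact Or.inr ⟨List.mem_cons_of_mem _ h1, fun hm => h2 (Or.inl hm), h3⟩
          · rintro (h | ⟨h1, h2, h3⟩)
            · exact Or.inl (Or.inl h)
            · rcases List.mem_cons.mp h1 with h1' | h1'
              · exact absurd h1' hwn
              · exact Or.inr ⟨h1', fun hm => hm.elim (fun hs => h2 hs) hwn, h3⟩
    · rw [if_neg hcnd]
      obtain ⟨seen', heq, hmem⟩ := ih hnd' seen out
      refine ⟨seen', ?_, ?_⟩
      · rw [heq, List.filter_cons_of_neg (by simpa using hcnd)]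
      · intro w
        rw [hmem w]
        by_cases hwn : w = num
        · subst hwn
          constructor
          · rintro (h | ⟨h1, h2, h3⟩)
            · exact Or.inl h
            · exact Or.inr ⟨List.mem_cons_of_mem _ h1, h2, h3⟩
          · rintro (h | ⟨h1, h2, h3⟩)
            · exact Or.inl h
            · exact absurd ⟨h2, h3⟩ hcnd
        · constructor
          · rintro (h | ⟨h1, h2, h3⟩)
            · exact Or.inl h
            · exact Or.inr ⟨List.mem_cons_of_mem _ h1, h2, h3⟩
          · rintro (h | ⟨h1, h2, h3⟩)
            · exact Or.inl h
            · rcases List.mem_cons.mp h1 with h1' | h1'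
              · exact absurd h1' hwn
              · exact Or.inr ⟨h1', h2, h3⟩

theorem outer_spec (s : List Char) (n : Nat) :
    ∃ seen' : PySem.Set String,
      (List.range n).foldl (altStep s) (PySem.Set.empty, []) = (seen', canon s n)
      ∧ ∀ w : String, w ∈ seen' ↔ w ∈ pyNumbers ∧ ∃ j, j < n ∧ Occ s j w := by
  induction n with
  | zero =>
    refine ⟨PySem.Set.empty, by simp [canon], fun w => ?_⟩
    simp [PySem.Set.empty]
  | succ n ih =>
    obtain ⟨sn, heq, hmem⟩ := ih
    obtain ⟨seen', heq2, hmem2⟩ := inner_spec s n pyNumbers pyNodup sn (canon s n)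
    refine ⟨seen', ?_, ?_⟩
    · rw [List.range_succ, List.foldl_append, heq]
      simp only [List.foldl_cons, List.foldl_nil]
      show altStep s (sn, canon s n) n = _
      unfold altStep
      rw [heq2]
      have hfe : pyNumbers.filter (fun w =>
            decide (w ∉ sn ∧ PySem.Chars.startswith (s.drop n) w.toList = true))
          = pyNumbers.filter (fun w =>
            decide (Occ s n w ∧ ∀ k, k < n → ¬ Occ s k w)) := by
        refine List.filter_congr ?_
        intro w hw
        simp only [decide_eq_decide]
        rw [PySem.Chars.startswith_iff, hmem w]
        constructor
        · rintro ⟨h1, h2⟩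
          refine ⟨h2, fun k hk ho => h1 ⟨hw, k, hk, ho⟩⟩
        · rintro ⟨h1, h2⟩
          refine ⟨fun hm => ?_, h1⟩
          obtain ⟨-, j, hj, ho⟩ := hm
          exact h2 j hj ho
      rw [hfe]
      have hc : canon s (n + 1) = canon s n ++ canonGroup s n := by
        rw [canon, canon, List.range_succ, List.flatMap_append]
        simp
      rw [hc, canonGroup]
    · intro w
      rw [hmem2 w, hmem w, PySem.Chars.startswith_iff]
      constructor
      · rintro (⟨hpy, j, hj, ho⟩ | ⟨hpy, -, hsw⟩)
        · exact ⟨hpy, j, by omega, ho⟩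
        · exact ⟨hpy, n, by omega, hsw⟩
      · rintro ⟨hpy, j, hj, ho⟩
        by_cases hs : w ∈ pyNumbers ∧ ∃ j, j < n ∧ Occ s j w
        · exact Or.inl hs
        · have hj' : j = n := by
            by_contra hne
            exact hs ⟨hpy, j, by omega, ho⟩
          exact Or.inr ⟨hpy, hs, hj' ▸ ho⟩

theorem alt_eq_canon (line : String) :
    getReplacementOrder_alt line = canon line.toList line.toList.length := by
  obtain ⟨seen', heq, -⟩ := outer_spec line.toList line.toList.length
  show ((List.range line.toList.length).foldl (altStep line.toList) (PySem.Set.empty, [])).2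
      = canon line.toList line.toList.length
  rw [heq]

theorem mem_canon {s : List Char} {n : Nat} {p : Int × String} :
    p ∈ canon s n ↔ ∃ j, j < n ∧ ∃ w, w ∈ pyNumbers ∧
      (Occ s j w ∧ ∀ k, k < j → ¬ Occ s k w) ∧ p = ((j : Int), w) := by
  simp only [canon, canonGroup, List.mem_flatMap, List.mem_filter, List.mem_map,
    List.mem_range, decide_eq_true_eq]
  constructor
  · rintro ⟨j, hj, w, ⟨hw, hc⟩, hp⟩
    exact ⟨j, hj, w, hw, hc, hp.symm⟩
  · rintro ⟨j, hj, w, hw, hc, hp⟩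
    exact ⟨j, hj, w, ⟨hw, hc⟩, hp.symm⟩

-- first-occurrence ↔ Chars.find
theorem occ_lt_length {s : List Char} {w : String} {j : Nat} (hw : w.toList ≠ [])
    (h : Occ s j w) : j < s.length := by
  by_contra hn
  have : s.drop j = [] := List.drop_eq_nil_iff.mpr (by omega)
  rw [Occ, this, List.prefix_nil] at h
  exact hw h

theorem find_of_first_occ {s : List Char} {w : String} {j : Nat}
    (hcond : Occ s j w ∧ ∀ k, k < j → ¬ Occ s k w) :
    PySem.Chars.find s w.toList = (j : Int) := by
  obtain ⟨ho, hmin⟩ := hcond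
  have hin : PySem.Chars.isIn w.toList s = true :=
    (PySem.Chars.exists_prefix_drop_iff_isIn _ _).mp ⟨j, ho⟩
  have hnn : 0 ≤ PySem.Chars.find s w.toList :=
    (PySem.Chars.find_nonneg_iff _ _).mpr ((PySem.Chars.isIn_iff_infix _ _).mp hin)
  obtain ⟨hpre, hfirst⟩ := PySem.Chars.find_spec hnn
  have h1 : ¬ j < (PySem.Chars.find s w.toList).toNat := fun hlt => hfirst j hlt ho
  have h2 : ¬ (PySem.Chars.find s w.toList).toNat < j := fun hlt =>
    hmin _ hlt hpre
  omega

theorem first_occ_of_isIn {s : List Char} {w : String} (hw : w.toList ≠ [])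
    (h : PySem.Chars.isIn w.toList s = true) :
    ∃ j, j < s.length ∧ (Occ s j w ∧ ∀ k, k < j → ¬ Occ s k w) ∧
      PySem.Chars.find s w.toList = (j : Int) := by
  have hnn : 0 ≤ PySem.Chars.find s w.toList :=
    (PySem.Chars.find_nonneg_iff _ _).mpr ((PySem.Chars.isIn_iff_infix _ _).mp h)
  obtain ⟨hpre, hfirst⟩ := PySem.Chars.find_spec hnn
  refine ⟨(PySem.Chars.find s w.toList).toNat, occ_lt_length hw hpre, ⟨hpre, ?_⟩, by omega⟩
  intro k hk hko
  exact hfirst k hk hko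

-- A's unsorted list
def listA (line : String) : List (Int × String) :=
  (pyNumbers.filter (fun w => PySem.Str.isIn w line)).map
    (fun w => (PySem.Str.find line w, w))

theorem pairwise_of_nodup_of_allEq {α : Type} (R : α → α → Prop) :
    ∀ l : List α, l.Nodup → (∀ a ∈ l, ∀ b ∈ l, a = b) → l.Pairwise R := by
  intro l hnd hall
  match l with
  | [] => exact List.Pairwise.nil
  | [a] => exact List.pairwise_singleton R a
  | a :: b :: t =>
    exfalso
    have hab : a = b := hall a (by simp) b (by simp)
    have := (List.nodup_cons.mp hnd).1
    exact this (hab ▸ List.mem_cons_self)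

theorem mem_canonGroup {s : List Char} {j : Nat} {p : Int × String} :
    p ∈ canonGroup s j ↔ ∃ w, w ∈ pyNumbers ∧
      (Occ s j w ∧ ∀ k, k < j → ¬ Occ s k w) ∧ p = ((j : Int), w) := by
  simp only [canonGroup, List.mem_map, List.mem_filter, decide_eq_true_eq]
  constructor
  · rintro ⟨w, ⟨hw, hc⟩, hp⟩; exact ⟨w, hw, hc, hp.symm⟩
  · rintro ⟨w, hw, hc, hp⟩; exact ⟨w, ⟨hw, hc⟩, hp.symm⟩

theorem canon_pairwise (s : List Char) (n : Nat) :
    (canon s n).Pairwise (fun a b => a.1 < b.1) := by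
  unfold canon
  rw [List.pairwise_flatMap]
  constructor
  · intro j _
    refine pairwise_of_nodup_of_allEq _ _ ?_ ?_
    · refine (List.Nodup.filter _ pyNodup).map ?_
      intro w1 w2 h
      exact (Prod.mk.injEq _ _ _ _ ▸ h).2
    · intro a ha b hb
      obtain ⟨w1, hw1, hc1, ha'⟩ := mem_canonGroup.mp ha
      obtain ⟨w2, hw2, hc2, hb'⟩ := mem_canonGroup.mp hb
      have : w1 = w2 := occ_unique hw1 hw2 hc1.1 hc2.1
      rw [ha', hb', this]
  · refine List.pairwise_lt_range.imp ?_
    intro j1 j2 hj x hx y hy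
    obtain ⟨w1, _, _, hx'⟩ := mem_canonGroup.mp hx
    obtain ⟨w2, _, _, hy'⟩ := mem_canonGroup.mp hy
    rw [hx', hy']
    show (j1 : Int) < (j2 : Int)
    exact_mod_cast hj

theorem canon_nodup (s : List Char) (n : Nat) : (canon s n).Nodup :=
  (canon_pairwise s n).imp (fun h he => by rw [he] at h; exact lt_irrefl _ h)

theorem listA_nodup (line : String) : (listA line).Nodup := by
  refine (List.Nodup.filter _ pyNodup).map ?_
  intro w1 w2 h
  exact (Prod.mk.injEq _ _ _ _ ▸ h).2

theorem canon_perm_listA (line : String) :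
    (canon line.toList line.toList.length).Perm (listA line) := by
  refine (List.perm_ext_iff_of_nodup (canon_nodup _ _) (listA_nodup line)).mpr ?_
  intro p
  rw [mem_canon]
  simp only [listA, List.mem_map, List.mem_filter, PySem.Str.isIn_eq, PySem.Str.find_eq]
  constructor
  · rintro ⟨j, hj, w, hw, hc, hp⟩
    refine ⟨w, ⟨hw, (PySem.Chars.exists_prefix_drop_iff_isIn _ _).mp ⟨j, hc.1⟩⟩, ?_⟩
    rw [find_of_first_occ hc, ← hp]
  · rintro ⟨w, ⟨hw, hin⟩, hp⟩
    obtain ⟨j, hj, hc, hf⟩ := first_occ_of_isIn (pyNonempty w hw) hin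
    exact ⟨j, hj, w, hw, hc, by rw [← hp, hf]⟩

-- sorted2 on a list with pairwise-distinct first components is sorted by fst
theorem insertBy_congr {α : Type} (b1 b2 : α → α → Bool) (x : α) :
    ∀ (acc : List α), (∀ y ∈ acc, b1 x y = b2 x y) →
      PySem.List.insertBy b1 x acc = PySem.List.insertBy b2 x acc := by
  intro acc
  induction acc with
  | nil => intro _; rfl
  | cons y ys ih =>
    intro h
    simp only [PySem.List.insertBy, h y (List.mem_cons_self)]
    by_cases hb : b2 x y = true
    · simp [hb]
    · simp only [Bool.not_eq_true] at hb
      simp [hb, ih (fun z hz => h z (List.mem_cons_of_mem _ hz))]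

theorem foldl_insertBy_congr {α : Type} (b1 b2 : α → α → Bool) :
    ∀ (xs acc : List α), (∀ x ∈ xs, ∀ y, (y ∈ xs ∨ y ∈ acc) → b1 x y = b2 x y) →
      xs.foldl (fun acc x => PySem.List.insertBy b1 x acc) acc
        = xs.foldl (fun acc x => PySem.List.insertBy b2 x acc) acc := by
  intro xs
  induction xs with
  | nil => intro _ _; rfl
  | cons x xs ih =>
    intro acc h
    simp only [List.foldl_cons]
    rw [insertBy_congr b1 b2 x acc (fun y hy => h x (List.mem_cons_self) y (Or.inr hy))]
    exact ih _ (fun z hz y hy => by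
      refine h z (List.mem_cons_of_mem _ hz) y ?_
      rcases hy with hy | hy
      · exact Or.inl (List.mem_cons_of_mem _ hy)
      · rcases (PySem.List.mem_insertBy _ _ _ _).mp hy with h' | h'
        · exact Or.inl (h' ▸ List.mem_cons_self)
        · exact Or.inr h')

theorem sorted2_eq_sorted_fst (L : List (Int × String))
    (hL : ∀ a ∈ L, ∀ b ∈ L, a.1 = b.1 → a = b) :
    PySem.List.sorted2 L (fun p => p.1) (fun p => p.2)
      = PySem.List.sorted L (fun p => p.1) := by
  show L.foldl (fun acc x => PySem.List.insertBy _ x acc) []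
      = L.foldl (fun acc x => PySem.List.insertBy _ x acc) []
  refine foldl_insertBy_congr _ _ L [] ?_
  intro a ha b hb'
  rcases hb' with hb | hb
  · rcases lt_trichotomy a.1 b.1 with h | h | h
    · simp [h, not_lt_of_gt h]
    · have : a = b := hL a ha b hb h
      subst this
      simp
    · simp [h, not_lt_of_gt h]
  · simp at hb

theorem listA_fst_inj (line : String) :
    ∀ a ∈ listA line, ∀ b ∈ listA line, a.1 = b.1 → a = b := by
  intro a ha b hb h
  simp only [listA, List.mem_map, List.mem_filter, PySem.Str.isIn_eq, PySem.Str.find_eq] at ha hb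
  obtain ⟨w1, ⟨hw1, hin1⟩, ha'⟩ := ha
  obtain ⟨w2, ⟨hw2, hin2⟩, hb'⟩ := hb
  obtain ⟨j1, -, hc1, hf1⟩ := first_occ_of_isIn (pyNonempty w1 hw1) hin1
  obtain ⟨j2, -, hc2, hf2⟩ := first_occ_of_isIn (pyNonempty w2 hw2) hin2
  rw [← ha', ← hb'] at h
  simp only at h
  rw [hf1, hf2] at h
  have hj : j1 = j2 := by exact_mod_cast h
  have : w1 = w2 := occ_unique hw1 hw2 hc1.1 (hj ▸ hc2.1)
  rw [← ha', ← hb', this]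

theorem A_eq_canon (line : String) :
    getReplacementOrder line = canon line.toList line.toList.length := by
  have hA : getReplacementOrder line
      = PySem.List.sorted2 (listA line) (fun p => p.1) (fun p => p.2) := by
    simp only [getReplacementOrder]
    rw [PySem.List.foldl_append_if_eq_filter, PySem.List.foldl_append_singleton_eq_map,
      List.nil_append, List.nil_append]
    rfl
  rw [hA, sorted2_eq_sorted_fst _ (listA_fst_inj line)]
  exact PySem.List.sorted_eq_of_perm_of_pairwise_lt _ _ _
    (canon_perm_listA line) (canon_pairwise _ _)

-- ===== VERDICT (by name: the statement is the Claim_ definition above) =====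
theorem getReplacementOrder_spec : Claim_equal_getReplacementOrder := by
  intro line _
  unfold Spec_getReplacementOrder
  rw [A_eq_canon, alt_eq_canon]
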